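-- pv_equiv track=rewrite | github.com/Mezgrman/Remixer | remixer_utils.py | strip_seq
-- ===== SOURCE A (Python) =====
-- def strip_seq(seq, empty = None):
-- 	start = 0
-- 	end = 0
-- 	for i in range(len(seq)):
-- 		item = seq[i]
-- 		if empty is not None:
-- 			if item != empty:
-- 				start = i
-- 				break
-- 		else:
-- 			if item:
-- 				start = i
-- 				break
-- 	rseq = seq[:]
-- 	rseq.reverse()
-- 	for i in range(len(rseq)):
-- 		item = rseq[i]
-- 		if empty is not None:
-- 			if item != empty:
-- 				end = len(seq) - i
-- 				break
-- 		else: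
-- 			if item:
-- 				end = len(seq) - i
-- 				break
-- 	stripped_seq = seq[start:end]
-- 	return stripped_seq
-- ===== SOURCE B (Python) =====
-- def strip_seq(seq, empty=None):
--     first = None
--     last = 0
--     for i in range(len(seq)):
--         item = seq[i]
--         nonempty = (item != empty) if empty is not None else bool(item)
--         if nonempty:
--             if first is None:
--                 first = i
--             last = i
--     if first is None:
--         return seq[0:0]
--     return seq[first:last + 1]
-- ===== Notes on version B (the rewrite author's own statement) =====
-- stated objective: simpler
-- what changed: Replaces A's two scans (forward scan plus a full reversed copy scanned again) with a single forward pass tracking the first and last non-empty indices, then one slice.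
import Mathlib
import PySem

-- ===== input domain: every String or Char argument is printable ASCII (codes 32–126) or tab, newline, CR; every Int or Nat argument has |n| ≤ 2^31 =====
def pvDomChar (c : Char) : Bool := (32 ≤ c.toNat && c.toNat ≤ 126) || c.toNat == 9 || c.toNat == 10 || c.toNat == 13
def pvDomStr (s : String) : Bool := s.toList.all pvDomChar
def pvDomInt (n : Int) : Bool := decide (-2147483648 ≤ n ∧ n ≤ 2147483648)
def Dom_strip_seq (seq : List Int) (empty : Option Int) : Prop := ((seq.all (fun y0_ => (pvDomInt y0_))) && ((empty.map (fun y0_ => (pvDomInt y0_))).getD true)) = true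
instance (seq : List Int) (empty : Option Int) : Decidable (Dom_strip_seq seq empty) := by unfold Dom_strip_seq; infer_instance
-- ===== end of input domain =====

-- B replaces A's two scans (forward scan plus a reversed-copy scan) with one
-- forward pass tracking first and last non-empty indices; objective: simpler.

-- ===== PORT A =====
-- first loop: for i in range(len(seq)): if item nonempty: start = i; break  (start stays 0)
def stripLoop1 (empty : Option Int) : List Int → Nat → Nat
  | [], _ => 0
  | x :: xs, i =>
    match empty with
    | some e => if x ≠ e then i else stripLoop1 empty xs (i + 1)
    | none => if x ≠ 0 then i else stripLoop1 empty xs (i + 1)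

-- second loop over the reversed copy: if item nonempty: end = len(seq) - i; break  (end stays 0)
def stripLoop2 (empty : Option Int) (n : Nat) : List Int → Nat → Nat
  | [], _ => 0
  | x :: xs, i =>
    match empty with
    | some e => if x ≠ e then n - i else stripLoop2 empty n xs (i + 1)
    | none => if x ≠ 0 then n - i else stripLoop2 empty n xs (i + 1)

def strip_seq (seq : List Int) (empty : Option Int) : List Int :=
  let start := stripLoop1 empty seq 0
  let rseq := seq.reverse
  let e := stripLoop2 empty seq.length rseq 0
  PySem.List.slice seq (some (start : Int)) (some (e : Int))

-- ===== PORT B =====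
-- single pass: for i in range(len(seq)): if nonempty: first = first or i; last = i
def altLoop (empty : Option Int) : List Int → Nat → Option Nat → Nat → Option Nat × Nat
  | [], _, first, last => (first, last)
  | x :: xs, i, first, last =>
    let ne : Bool := match empty with | some e => x != e | none => x != 0
    if ne then
      altLoop empty xs (i + 1) (match first with | none => some i | some f => some f) i
    else
      altLoop empty xs (i + 1) first last

def strip_seq_alt (seq : List Int) (empty : Option Int) : List Int :=
  match altLoop empty seq 0 none 0 with
  | (none, _) => PySem.List.slice seq (some 0) (some 0)
  | (some f, last) => PySem.List.slice seq (some (f : Int)) (some ((last : Int) + 1))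

-- ===== PRECONDITION & SPEC =====
def Spec_strip_seq (seq : List Int) (empty : Option Int) (out : List Int) : Prop := out = strip_seq_alt seq empty
instance (seq : List Int) (empty : Option Int) (out : List Int) : Decidable (Spec_strip_seq seq empty out) := by unfold Spec_strip_seq; infer_instance

-- ===== CLAIM (what is proved, stated in full; the proofs are below) =====
def Claim_equal_strip_seq : Prop := ∀ (seq : List Int) (empty : Option Int), Dom_strip_seq seq empty → Spec_strip_seq seq empty (strip_seq seq empty)

-- ===== LEMMAS AND PROOFS =====

-- the non-emptiness predicate both programs test
def pvPred (empty : Option Int) (x : Int) : Bool :=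
  match empty with | some e => x != e | none => x != 0

-- index of the last element satisfying the predicate (right-recursive characterisation)
def lastIdx (empty : Option Int) : List Int → Option Nat
  | [] => none
  | x :: xs =>
    match lastIdx empty xs with
    | some m => some (m + 1)
    | none => if pvPred empty x then some 0 else none

theorem stripLoop1_cons (empty : Option Int) (x : Int) (xs : List Int) (i : Nat) :
    stripLoop1 empty (x :: xs) i =
      if pvPred empty x then i else stripLoop1 empty xs (i + 1) := by
  cases empty <;> simp [stripLoop1, pvPred]

theorem stripLoop2_cons (empty : Option Int) (n : Nat) (x : Int) (xs : List Int) (i : Nat) :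
    stripLoop2 empty n (x :: xs) i =
      if pvPred empty x then n - i else stripLoop2 empty n xs (i + 1) := by
  cases empty <;> simp [stripLoop2, pvPred]

theorem altLoop_cons (empty : Option Int) (x : Int) (xs : List Int) (i : Nat)
    (first : Option Nat) (last : Nat) :
    altLoop empty (x :: xs) i first last =
      if pvPred empty x then altLoop empty xs (i + 1) (first.or (some i)) i
      else altLoop empty xs (i + 1) first last := by
  cases empty <;> cases first <;> simp [altLoop, pvPred, Option.or]

theorem stripLoop1_eq (empty : Option Int) (xs : List Int) (i : Nat) :
    stripLoop1 empty xs i =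
      match List.findIdx? (pvPred empty) xs with
      | some j => i + j
      | none => 0 := by
  induction xs generalizing i with
  | nil => simp [stripLoop1]
  | cons x xs ih =>
    rw [stripLoop1_cons, List.findIdx?_cons]
    by_cases h : pvPred empty x = true
    · simp [h]
    · rw [if_neg (by simp [h]), ih]
      cases hf : List.findIdx? (pvPred empty) xs <;> simp [h] <;> ring

theorem stripLoop2_eq (empty : Option Int) (n : Nat) (xs : List Int) (i : Nat) :
    stripLoop2 empty n xs i =
      match List.findIdx? (pvPred empty) xs with
      | some j => n - (i + j)
      | none => 0 := by
  induction xs generalizing i with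
  | nil => simp [stripLoop2]
  | cons x xs ih =>
    rw [stripLoop2_cons, List.findIdx?_cons]
    by_cases h : pvPred empty x = true
    · simp [h]
    · rw [if_neg (by simp [h]), ih]
      cases hf : List.findIdx? (pvPred empty) xs <;> simp [h]
      congr 1
      ring

theorem altLoop_eq (empty : Option Int) (xs : List Int) (i : Nat)
    (first : Option Nat) (last : Nat) :
    altLoop empty xs i first last =
      (first.or ((List.findIdx? (pvPred empty) xs).map (· + i)),
       match lastIdx empty xs with
       | some m => i + m
       | none => last) := by
  induction xs generalizing i first last with
  | nil => simp [altLoop, lastIdx]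
  | cons x xs ih =>
    rw [altLoop_cons, List.findIdx?_cons]
    by_cases h : pvPred empty x = true
    · rw [if_pos h, ih]
      simp only [lastIdx, h, if_pos]
      refine Prod.ext ?_ ?_
      · cases first <;> simp [Option.or]
      · cases hm : lastIdx empty xs <;> simp <;> ring
    · rw [if_neg h, ih]
      have h' : pvPred empty x = false := by simpa using h
      simp only [lastIdx, h', Bool.false_eq_true, if_false]
      refine Prod.ext ?_ ?_
      · cases hf : List.findIdx? (pvPred empty) xs <;>
          cases first <;> simp [Option.or] <;> ring
      · cases hm : lastIdx empty xs <;> simp <;> ring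

theorem lastIdx_lt (empty : Option Int) (xs : List Int) (m : Nat)
    (h : lastIdx empty xs = some m) : m < xs.length := by
  induction xs generalizing m with
  | nil => simp [lastIdx] at h
  | cons x xs ih =>
    simp only [lastIdx] at h
    cases hm : lastIdx empty xs with
    | some k => rw [hm] at h; simp at h; have := ih k hm; simp; omega
    | none =>
      rw [hm] at h
      split at h <;> simp_all <;> omega

theorem findIdx?_reverse_eq (empty : Option Int) (xs : List Int) :
    List.findIdx? (pvPred empty) xs.reverse =
      (lastIdx empty xs).map (fun m => xs.length - 1 - m) := by
  induction xs with
  | nil => simp [lastIdx]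
  | cons x xs ih =>
    rw [List.reverse_cons, List.findIdx?_append, ih]
    cases hm : lastIdx empty xs with
    | some k =>
      have hk := lastIdx_lt empty xs k hm
      simp [lastIdx, hm, Option.or]
      omega
    | none =>
      by_cases h : pvPred empty x = true <;>
        simp [lastIdx, hm, h, List.findIdx?_cons, Option.or, List.length_reverse]

theorem lastIdx_none_iff (empty : Option Int) (xs : List Int) :
    lastIdx empty xs = none ↔ List.findIdx? (pvPred empty) xs = none := by
  induction xs with
  | nil => simp [lastIdx]
  | cons x xs ih =>
    rw [List.findIdx?_cons]
    simp only [lastIdx]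
    cases hm : lastIdx empty xs <;>
      by_cases h : pvPred empty x = true <;>
        simp_all

-- ===== VERDICT (by name: the statement is the Claim_ definition above) =====
theorem strip_seq_spec : Claim_equal_strip_seq := by
  intro seq empty _
  show strip_seq seq empty = strip_seq_alt seq empty
  simp only [strip_seq, strip_seq_alt, altLoop_eq, stripLoop1_eq, stripLoop2_eq,
    findIdx?_reverse_eq]
  cases hm : lastIdx empty seq with
  | none =>
    have hnone : List.findIdx? (pvPred empty) seq = none :=
      (lastIdx_none_iff empty seq).mp hm
    simp [hnone, Option.or]
  | some m =>
    have hlt := lastIdx_lt empty seq m hm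
    have hns : lastIdx empty seq ≠ none := by simp [hm]
    have hf : List.findIdx? (pvPred empty) seq ≠ none := by
      intro hc
      exact hns ((lastIdx_none_iff empty seq).mpr hc)
    cases hj : List.findIdx? (pvPred empty) seq with
    | none => exact absurd hj hf
    | some j =>
      simp only [Option.map_some, Option.or]
      have h2 : seq.length - (seq.length - 1 - m) = m + 1 := by omega
      have h3 : ((m + 1 : Nat) : Int) = (m : Int) + 1 := by push_cast; ring
      simp only [Nat.zero_add, Nat.add_zero, h2, h3]
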